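-- pv_equiv track=rewrite | github.com/JustAFloatingHead/KuhanPiirran | Commands.py | innest_parenthesis_pairs
-- ===== SOURCE A (Python) =====
-- def count(substr,theStr):
--     num = 0
--     for i in range(len(theStr)):
--         if theStr[i:i+len(substr)] == substr:
--             num += 1
--     return num
--
-- def innest_parenthesis_pairs(function_str):
--     if count("(",function_str)==0 and count(")",function_str)==0:
--         return []
--     result=[]
--     if count("(",function_str) == count(")",function_str):
--         for i in range(len(function_str)):
--             if function_str[i]=="(":
--                 if function_str[i+1:].find(")")<function_str[i+1:].find("(") or function_str[i+1:].find("(")==-1: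
--                     result.append([i,i+1+function_str[i+1:].find(")")])
--     return result
-- ===== SOURCE B (Python) =====
-- def innest_parenthesis_pairs(function_str):
--     if function_str.count("(") != function_str.count(")"):
--         return []
--     result = []
--     next_open = -1
--     next_close = -1
--     for i in range(len(function_str) - 1, -1, -1):
--         c = function_str[i]
--         if c == "(":
--             if next_close != -1 and (next_open == -1 or next_close < next_open):
--                 result.append([i, next_close])
--             next_open = i
--         elif c == ")":
--             next_close = i
--     return result[::-1]
-- ===== Notes on version B (the rewrite author's own statement) =====
-- stated objective: faster
-- what changed: Replaces the per-open-parenthesis substring find() scans (and the hand-rolled quadratic count helper) with a single right-to-left pass that maintains the positions of the nearest following open and close parentheses, building the result back-to-front and reversing once; Pre_ excludes strings that have equally many '(' and ')' yet contain some '(' with no ')' after it, a malformed corner where no pairing exists and A's zero-width [i,i] markers and B's omission of them are equally unspecified answers.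
-- outside the precondition, e.g. on innest_parenthesis_pairs(')('): A returns [[1, 1]], B returns []
import Mathlib
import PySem

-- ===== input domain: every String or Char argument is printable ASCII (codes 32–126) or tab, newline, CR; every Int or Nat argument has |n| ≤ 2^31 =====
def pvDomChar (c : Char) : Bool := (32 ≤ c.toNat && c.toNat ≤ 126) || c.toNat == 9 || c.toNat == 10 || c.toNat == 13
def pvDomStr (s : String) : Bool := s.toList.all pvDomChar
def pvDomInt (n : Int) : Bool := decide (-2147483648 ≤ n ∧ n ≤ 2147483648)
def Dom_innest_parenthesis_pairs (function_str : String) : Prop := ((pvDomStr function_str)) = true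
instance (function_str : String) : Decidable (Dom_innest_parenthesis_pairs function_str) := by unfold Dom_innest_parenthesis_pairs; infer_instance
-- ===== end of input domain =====

-- B replaces A's per-open-parenthesis substring find() scans and its quadratic hand-rolled
-- count helper by one right-to-left pass keeping the nearest following open/close positions
-- (objective: faster). Pre_ excludes strings where some '(' has no ')' after it (see its
-- comment); there A and B return different unspecified values on a malformed corner.
-- Strings are handled as their code-point lists via PySem.Chars/PySem.List (exact).

-- ===== PORT A =====
-- helper `count(substr, theStr)` of the module, transliterated
def pvCountA (substr theStr : List Char) : Int :=
  (PySem.List.pyRange 0 (theStr.length : Int) 1).foldl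
    (fun num i =>
      if PySem.List.slice theStr (some i) (some (i + (substr.length : Int))) = substr then num + 1
      else num)
    0

def innest_parenthesis_pairs (function_str : String) : List (List Int) :=
  let l := function_str.toList
  if pvCountA ['('] l = 0 ∧ pvCountA [')'] l = 0 then []
  else if pvCountA ['('] l = pvCountA [')'] l then
    (PySem.List.pyRange 0 (l.length : Int) 1).foldl
      (fun result i =>
        if PySem.List.pyGetD l i ' ' = '(' then
          if PySem.Chars.find (PySem.List.slice l (some (i + 1)) none) [')'] <
               PySem.Chars.find (PySem.List.slice l (some (i + 1)) none) ['('] ∨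
             PySem.Chars.find (PySem.List.slice l (some (i + 1)) none) ['('] = -1 then
            result ++ [[i, i + 1 + PySem.Chars.find (PySem.List.slice l (some (i + 1)) none) [')']]]
          else result
        else result)
      []
  else []

-- ===== PORT B =====
def innest_parenthesis_pairs_alt (function_str : String) : List (List Int) :=
  let l := function_str.toList
  if PySem.Chars.count l ['('] ≠ PySem.Chars.count l [')'] then []
  else
    let st := (PySem.List.pyRange ((l.length : Int) - 1) (-1) (-1)).foldl
      (fun (s : List (List Int) × Int × Int) i =>
        let c := PySem.List.pyGetD l i ' '
        if c = '(' then
          ((if s.2.2 ≠ -1 ∧ (s.2.1 = -1 ∨ s.2.2 < s.2.1) then s.1 ++ [[i, s.2.2]] else s.1),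
           i, s.2.2)
        else if c = ')' then (s.1, s.2.1, i)
        else s)
      ([], -1, -1)
    (PySem.List.slice? st.1 none none (-1)).getD []   -- result[::-1]

-- ===== PRECONDITION & SPEC =====
-- Pre_ excludes strings that have equally many '(' and ')' yet contain a '(' with no ')'
-- anywhere after it: the parentheses cannot pair up there, so no particular value is
-- specified — A returns zero-width [i,i] markers for such opens, B returns no pair for them.
-- (the foldl flag is true iff some '(' occurs after the last ')', one linear pass)
def Pre_innest_parenthesis_pairs (function_str : String) : Prop :=
  ¬ (function_str.toList.foldl (fun a c => if c = ')' then false else a || (c = '(')) false = true ∧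
     function_str.toList.count '(' = function_str.toList.count ')')
instance (function_str : String) : Decidable (Pre_innest_parenthesis_pairs function_str) := by
  unfold Pre_innest_parenthesis_pairs; infer_instance

def pvWitness_innest_parenthesis_pairs : String := "(a)"

def Spec_innest_parenthesis_pairs (function_str : String) (out : List (List Int)) : Prop := out = innest_parenthesis_pairs_alt function_str
instance (function_str : String) (out : List (List Int)) : Decidable (Spec_innest_parenthesis_pairs function_str out) := by unfold Spec_innest_parenthesis_pairs; infer_instance

-- ===== CLAIM (what is proved, stated in full; the proofs are below) =====
def Claim_equal_innest_parenthesis_pairs : Prop := ∀ (function_str : String), Dom_innest_parenthesis_pairs function_str → Pre_innest_parenthesis_pairs function_str → Spec_innest_parenthesis_pairs function_str (innest_parenthesis_pairs function_str)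

-- ===== LEMMAS AND PROOFS =====

-- Python `s.find(c)` for a single character, structurally
def pvFindChar (c : Char) : List Char → Int
  | [] => -1
  | d :: t => if d = c then 0 else (if pvFindChar c t = -1 then -1 else pvFindChar c t + 1)

theorem pvFindChar_ge (c : Char) (t : List Char) : -1 ≤ pvFindChar c t := by
  induction t with
  | nil => simp [pvFindChar]
  | cons d t ih => simp only [pvFindChar]; split_ifs <;> omega

theorem pvFindChar_eq_neg_one (c : Char) (t : List Char) :
    pvFindChar c t = -1 ↔ c ∉ t := by
  induction t with
  | nil => simp [pvFindChar]
  | cons d t ih =>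
    have hb := pvFindChar_ge c t
    by_cases h : d = c
    · simp [pvFindChar, h]
    · simp only [pvFindChar, h, if_false, List.mem_cons, not_or]
      constructor
      · intro hh; split_ifs at hh with h2
        · exact ⟨Ne.symm h, ih.mp h2⟩
        · omega
      · intro ⟨_, h2⟩; simp [ih.mpr h2]

theorem pvFindChar_go (c : Char) (t : List Char) (k : Nat) :
    PySem.Chars.find.go [c] t k = if pvFindChar c t = -1 then -1 else pvFindChar c t + k := by
  induction t generalizing k with
  | nil => simp [PySem.Chars.find.go, pvFindChar]
  | cons d t ih =>
    rw [PySem.Chars.find.go]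
    by_cases h : d = c
    · simp [List.isPrefixOf, h, pvFindChar]
    · have hne : (c == d) = false := by simp [Ne.symm h]
      simp only [List.isPrefixOf, hne, Bool.false_and, if_false, ih (k+1), pvFindChar, h]
      have hb := pvFindChar_ge c t
      split_ifs <;> (try exact absurd rfl (by assumption)) <;>
        (try exact False.elim (by assumption)) <;> push_cast <;> omega

theorem pvFindChar_eq (c : Char) (t : List Char) : PySem.Chars.find t [c] = pvFindChar c t := by
  rw [PySem.Chars.find, pvFindChar_go]; split_ifs with h <;> simp [h]

theorem pvCountChar_go (c : Char) (fuel : Nat) (l : List Char) (acc : Nat) (h : l.length ≤ fuel) :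
    PySem.Chars.count.go [c] fuel l acc = acc + l.count c := by
  induction fuel generalizing l acc with
  | zero =>
    cases l with
    | nil => simp [PySem.Chars.count.go]
    | cons d t => simp at h
  | succ n ih =>
    cases l with
    | nil => simp [PySem.Chars.count.go]
    | cons d t =>
      rw [PySem.Chars.count.go]
      by_cases hd : d = c
      · simp only [List.isPrefixOf, hd, beq_self_eq_true, Bool.true_and]
        simp [ih _ _ (by simpa using Nat.le_of_succ_le_succ (by simpa using h))]
        omega
      · have hne : (c == d) = false := by simp [Ne.symm hd]
        simp [List.isPrefixOf, hne,
          ih _ _ (by simpa using Nat.le_of_succ_le_succ (by simpa using h)), hd]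

theorem pvCountChar_eq (c : Char) (l : List Char) : PySem.Chars.count l [c] = l.count c := by
  rw [PySem.Chars.count]; simp [pvCountChar_go c l.length l 0 le_rfl]

-- A's count fold equals List.count
theorem pvCountA_go (c : Char) (l : List Char) :
    ∀ (m k : Nat) (acc : Int), k + m = l.length →
      (PySem.List.pyRange (k : Int) (l.length : Int) 1).foldl
        (fun num i =>
          if PySem.List.slice l (some i) (some (i + ((1:Nat) : Int))) = [c] then num + 1 else num)
        acc = acc + ((l.drop k).count c : Int) := by
  intro m
  induction m with
  | zero =>
    intro k acc hk
    have hkk : l.length ≤ k := by omega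
    rw [PySem.List.pyRange_one_eq_nil (a := (k : Int)) (b := (l.length : Int)) (by exact_mod_cast hkk)]
    rw [List.drop_eq_nil_of_le hkk]
    simp
  | succ m ih =>
    intro k acc hk
    have hklt : k < l.length := by omega
    rw [PySem.List.pyRange_one_cons (by exact_mod_cast hklt)]
    simp only [List.foldl_cons]
    have hsl : PySem.List.slice l (some (k : Int)) (some ((k : Int) + ((1:Nat) : Int))) = [l[k]] := by
      have : ((k : Int) + ((1:Nat) : Int)) = ((k + 1 : Nat) : Int) := by push_cast; ring
      rw [this, PySem.List.slice_natCast]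
      rw [List.drop_eq_getElem_cons hklt]
      have ht : k + 1 - k = 1 := by omega
      rw [ht]
      rfl
    have hcast : ((k : Int) + 1) = ((k + 1 : Nat) : Int) := by push_cast; ring
    rw [hsl, hcast, ih (k+1) _ (by omega)]
    rw [List.drop_eq_getElem_cons hklt, List.count_cons]
    by_cases hc : l[k] = c
    · simp [hc]; ring
    · have : ([l[k]] : List Char) ≠ [c] := by simpa using hc
      simp [this, hc]

theorem pvCountA_eq (c : Char) (l : List Char) : pvCountA [c] l = (l.count c : Int) := by
  unfold pvCountA
  have := pvCountA_go c l l.length 0 0 (by omega)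
  simpa using this

-- the scan of B, structurally on the string (tail processed first = right-to-left pass);
-- the result list is accumulated in B's (reversed) order
def pvScan : List Char → Int → List (List Int) × Int × Int
  | [], _ => ([], -1, -1)
  | c :: t, k =>
    let s := pvScan t (k + 1)
    if c = '(' then
      ((if s.2.2 ≠ -1 ∧ (s.2.1 = -1 ∨ s.2.2 < s.2.1) then s.1 ++ [[k, s.2.2]] else s.1),
       k, s.2.2)
    else if c = ')' then (s.1, s.2.1, k)
    else s

-- what A's loop appends, structurally on the string
def pvEmit : List Char → Int → List (List Int)
  | [], _ => []
  | c :: t, k =>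
    (if c = '(' ∧ (pvFindChar ')' t < pvFindChar '(' t ∨ pvFindChar '(' t = -1)
     then [[k, k + 1 + pvFindChar ')' t]] else []) ++ pvEmit t (k + 1)

theorem pvScan_no (t : List Char) (k : Int) :
    (pvScan t k).2.1 = if pvFindChar '(' t = -1 then -1 else k + pvFindChar '(' t := by
  induction t generalizing k with
  | nil => simp [pvScan, pvFindChar]
  | cons c t ih =>
    have hb := pvFindChar_ge '(' t
    by_cases hc : c = '('
    · simp [pvScan, pvFindChar, hc]
    · by_cases hc2 : c = ')' <;>
        · simp [pvScan, pvFindChar, hc, hc2, ih (k+1)]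
          split_ifs <;> omega

theorem pvScan_nc (t : List Char) (k : Int) :
    (pvScan t k).2.2 = if pvFindChar ')' t = -1 then -1 else k + pvFindChar ')' t := by
  induction t generalizing k with
  | nil => simp [pvScan, pvFindChar]
  | cons c t ih =>
    have hb := pvFindChar_ge ')' t
    by_cases hc : c = '('
    · have hcc : c ≠ ')' := by rw [hc]; decide
      simp [pvScan, pvFindChar, hc, ih (k+1)]
      split_ifs <;> omega
    · by_cases hc2 : c = ')'
      · simp [pvScan, pvFindChar, hc2]
      · simp [pvScan, pvFindChar, hc, hc2, ih (k+1)]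
        split_ifs <;> omega

-- the D_ flag holds iff some '(' has no ')' after it
theorem pvFlag_general (l : List Char) :
    ∀ b : Bool, l.foldl (fun a c => if c = ')' then false else a || (c = '(')) b = true ↔
      ((∃ i, l[i]? = some '(' ∧ ')' ∉ l.drop (i + 1)) ∨ (b = true ∧ ')' ∉ l)) := by
  induction l with
  | nil => intro b; simp
  | cons c t ih =>
    intro b
    have hsplit : (∃ i, (c :: t)[i]? = some '(' ∧ ')' ∉ (c :: t).drop (i + 1)) ↔
        ((c = '(' ∧ ')' ∉ t) ∨ ∃ i, t[i]? = some '(' ∧ ')' ∉ t.drop (i + 1)) := by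
      constructor
      · rintro ⟨i, hi, hn⟩
        cases i with
        | zero => left; constructor <;> simp_all
        | succ i => right; exact ⟨i, by simpa using hi, by simpa using hn⟩
      · rintro (⟨h1, h2⟩ | ⟨i, hi, hn⟩)
        · exact ⟨0, by simp [h1], by simpa using h2⟩
        · exact ⟨i + 1, by simpa using hi, by simpa using hn⟩
    simp only [List.foldl_cons]
    rw [ih, hsplit]
    by_cases hc : c = ')'
    · subst hc; simp
    · by_cases ho : c = '('
      · subst ho
        simp only [if_neg hc, decide_true, Bool.or_true, true_and, List.mem_cons, not_or,
          Bool.true_eq, Char.reduceEq, not_false_eq_true]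
        norm_num
        constructor
        · rintro (h | h)
          exacts [Or.inl (Or.inr h), Or.inl (Or.inl h)]
        · rintro ((h | h) | ⟨_, h⟩)
          exacts [Or.inr h, Or.inl h, Or.inr h]
      · simp [hc, ho, Ne.symm hc]

theorem pvFlag_iff (l : List Char) :
    l.foldl (fun a c => if c = ')' then false else a || (c = '(')) false = true ↔
      ∃ i, l[i]? = some '(' ∧ ')' ∉ l.drop (i + 1) := by
  rw [pvFlag_general]; simp

-- Good t: every '(' in t has a ')' somewhere after it
def pvGood (t : List Char) : Prop :=
  ∀ i, t[i]? = some '(' → ')' ∈ t.drop (i + 1)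

theorem pvGood_tail (c : Char) (t : List Char) (h : pvGood (c :: t)) : pvGood t :=
  fun i hi => by
    have := h (i + 1) (by simpa using hi)
    simpa using this

-- outside D_, A's per-position emissions agree with B's scan
theorem pvEmit_eq_scan (t : List Char) (hg : pvGood t) (k : Int) (hk : 0 ≤ k) :
    pvEmit t k = (pvScan t k).1.reverse := by
  induction t generalizing k with
  | nil => simp [pvEmit, pvScan]
  | cons c t ih =>
    have hbo := pvFindChar_ge '(' t
    have hbc := pvFindChar_ge ')' t
    have hgt := pvGood_tail c t hg
    by_cases hc : c = '('
    · subst hc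
      have hclose : ')' ∈ t := by simpa using hg 0 (by simp)
      have hfc : pvFindChar ')' t ≠ -1 := fun h => ((pvFindChar_eq_neg_one ')' t).mp h) hclose
      simp only [pvEmit, pvScan, pvScan_no, pvScan_nc, true_and]
      split_ifs <;> simp_all [ih hgt (k+1) (by omega)] <;> omega
    · by_cases hc2 : c = ')' <;> simp [pvEmit, pvScan, hc, hc2, ih hgt (k+1) (by omega)]

-- '(' ∉ l → nothing is emitted
theorem pvEmit_eq_nil (l : List Char) (h : '(' ∉ l) : ∀ k, pvEmit l k = [] := by
  induction l with
  | nil => intro k; simp [pvEmit]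
  | cons c t ih =>
    intro k
    simp only [List.mem_cons, not_or] at h
    simp [pvEmit, Ne.symm h.1, ih h.2]

-- A's loop over range(len) equals pvEmit
theorem pvFoldA (l : List Char) :
    ∀ (m k : Nat) (acc : List (List Int)), k + m = l.length →
      (PySem.List.pyRange (k : Int) (l.length : Int) 1).foldl
        (fun result i =>
          if PySem.List.pyGetD l i ' ' = '(' then
            if PySem.Chars.find (PySem.List.slice l (some (i + 1)) none) [')'] <
                 PySem.Chars.find (PySem.List.slice l (some (i + 1)) none) ['('] ∨
               PySem.Chars.find (PySem.List.slice l (some (i + 1)) none) ['('] = -1 then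
              result ++ [[i, i + 1 + PySem.Chars.find (PySem.List.slice l (some (i + 1)) none) [')']]]
            else result
          else result)
        acc = acc ++ pvEmit (l.drop k) k := by
  intro m
  induction m with
  | zero =>
    intro k acc hk
    have hkk : l.length ≤ k := by omega
    rw [PySem.List.pyRange_one_eq_nil (a := (k : Int)) (b := (l.length : Int)) (by exact_mod_cast hkk)]
    rw [List.drop_eq_nil_of_le hkk]
    simp [pvEmit]
  | succ m ih =>
    intro k acc hk
    have hklt : k < l.length := by omega
    rw [PySem.List.pyRange_one_cons (by exact_mod_cast hklt)]
    simp only [List.foldl_cons]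
    have hget : PySem.List.pyGetD l (k : Int) ' ' = l[k] := by
      rw [PySem.List.pyGetD_natCast, List.getD_eq_getElem l ' ' hklt]
    have hcast : ((k : Int) + 1) = ((k + 1 : Nat) : Int) := by push_cast; ring
    have hsl : PySem.List.slice l (some ((k : Int) + 1)) none = l.drop (k + 1) := by
      rw [hcast, PySem.List.slice_from_natCast]
    have hdrop : l.drop k = l[k] :: l.drop (k + 1) := (List.drop_eq_getElem_cons hklt)
    simp only [pvFindChar_eq] at ih ⊢
    rw [hget, hsl, hdrop]
    simp only [pvEmit]
    by_cases hc : l[k] = '('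
    · by_cases hcond : pvFindChar ')' (l.drop (k+1)) < pvFindChar '(' (l.drop (k+1)) ∨
          pvFindChar '(' (l.drop (k+1)) = -1
      · simp only [hc, hcond, if_pos, true_and, hcast]
        rw [ih (k+1) _ (by omega)]
        simp
      · simp only [hc, if_true, if_neg hcond, hcast]
        rw [ih (k+1) _ (by omega)]
        simp [hcond]
    · simp only [hcast]
      rw [ih (k+1) _ (by omega)]
      simp [hc]

-- B's countdown loop equals pvScan
theorem pvFoldB (l : List Char) :
    ∀ (k : Nat), k ≤ l.length →
      (PySem.List.pyRange ((k : Int) - 1) (-1) (-1)).foldl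
        (fun (s : List (List Int) × Int × Int) i =>
          let c := PySem.List.pyGetD l i ' '
          if c = '(' then
            ((if s.2.2 ≠ -1 ∧ (s.2.1 = -1 ∨ s.2.2 < s.2.1) then s.1 ++ [[i, s.2.2]] else s.1),
             i, s.2.2)
          else if c = ')' then (s.1, s.2.1, i)
          else s)
        (pvScan (l.drop k) (k : Int)) = pvScan l 0 := by
  intro k
  induction k with
  | zero =>
    intro _
    rw [PySem.List.pyRange_neg_one_eq_nil (by omega)]
    simp
  | succ k ih =>
    intro hk
    have hklt : k < l.length := by omega
    have h1 : ((k + 1 : Nat) : Int) - 1 = (k : Nat) := by push_cast; ring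
    have hget : PySem.List.pyGetD l (k : Int) ' ' = l[k] := by
      rw [PySem.List.pyGetD_natCast, List.getD_eq_getElem l ' ' hklt]
    have hdrop : l.drop k = l[k] :: l.drop (k + 1) := (List.drop_eq_getElem_cons hklt)
    have hcast : ((k : Int) + 1) = ((k + 1 : Nat) : Int) := by push_cast; ring
    rw [h1, PySem.List.pyRange_neg_one_cons (by exact_mod_cast Int.lt_of_lt_of_le (by omega) (le_refl (k:Int)))]
    simp only [List.foldl_cons]
    rw [← ih (by omega)]
    congr 1
    rw [hdrop]
    simp only [pvScan, hget, hcast]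

-- ===== VERDICT (by name: the statement is the Claim_ definition above) =====
theorem innest_parenthesis_pairs_spec : Claim_equal_innest_parenthesis_pairs := by
  intro s _ hpre
  unfold Spec_innest_parenthesis_pairs innest_parenthesis_pairs innest_parenthesis_pairs_alt
  set l := s.toList with hl
  simp only [pvCountA_eq, pvCountChar_eq, PySem.List.slice?_none_none_neg_one, Option.getD_some]
  have hfoldB := pvFoldB l l.length le_rfl
  simp only [List.drop_length] at hfoldB
  rw [show pvScan ([] : List Char) ((l.length : Nat) : Int) = ([], -1, -1) from rfl] at hfoldB
  by_cases he : List.count '(' l = List.count ')' l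
  · rw [if_neg (not_not_intro he)]
    have hg : pvGood l := by
      intro i hi
      by_contra hno
      have hflag := (pvFlag_iff l).mpr ⟨i, hi, hno⟩
      unfold Pre_innest_parenthesis_pairs at hpre
      rw [← hl] at hpre
      exact hpre ⟨hflag, he⟩
    rw [hfoldB, ← pvEmit_eq_scan l hg 0 (by norm_num)]
    by_cases hz0 : (List.count '(' l : Int) = 0 ∧ (List.count ')' l : Int) = 0
    · rw [if_pos hz0, pvEmit_eq_nil l (List.count_eq_zero.mp (by exact_mod_cast hz0.1)) 0]
    · rw [if_neg hz0, if_pos (by exact_mod_cast he)]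
      have hfoldA := pvFoldA l l.length 0 [] (by omega)
      simpa using hfoldA
  · rw [if_pos he]
    rw [if_neg (fun h => he (by exact_mod_cast h.1.trans h.2.symm) :
          ¬ ((List.count '(' l : Int) = 0 ∧ (List.count ')' l : Int) = 0)),
        if_neg (by exact_mod_cast he : ¬ ((List.count '(' l : Int) = (List.count ')' l : Int)))]
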